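-- pv_equiv track=rewrite | github.com/AndreaBozzo/Osservatorio | src/converters/tableau_converter.py | _categorize_dataset
-- ===== SOURCE A (Python) =====
-- def _categorize_dataset(
--     dataset_id: str, dataset_name: str
-- ) -> tuple[str, int]:
--     """Categorize dataset and return priority."""
--     name_lower = dataset_name.lower()
--
--     if any(
--         keyword in name_lower
--         for keyword in ["popolazione", "popola", "demografic", "residente"]
--     ):
--         return "popolazione", 10
--     elif any(
--         keyword in name_lower
--         for keyword in ["pil", "economia", "economico", "reddito", "prodotto"]
--     ):
--         return "economia", 9
--     elif any(
--         keyword in name_lower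
--         for keyword in ["lavoro", "occupazione", "disoccupazione", "employment"]
--     ):
--         return "lavoro", 8
--     elif any(
--         keyword in name_lower
--         for keyword in [
--             "territorio",
--             "territorial",
--             "regional",
--             "comune",
--             "provincia",
--         ]
--     ):
--         return "territorio", 7
--     elif any(
--         keyword in name_lower
--         for keyword in [
--             "istruzione",
--             "education",
--             "università",
--             "scuola",
--             "studenti",
--         ]
--     ):
--         return "istruzione", 6
--     elif any(
--         keyword in name_lower
--         for keyword in ["salute", "health", "sanità", "ospedale", "medicina"]
--     ):
--         return "salute", 5
--     else:
--         return "altro", 1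
-- ===== SOURCE B (Python) =====
-- # Gather ALL matching categories (table in alphabetical order, not A's branch
-- # order) and return the one with the highest priority; priorities are distinct,
-- # so this coincides with A's descending-priority first-match chain.
-- _CATEGORIES = {
--     "economia": (9, ["pil", "economia", "economico", "reddito", "prodotto"]),
--     "istruzione": (6, ["istruzione", "education", "università", "scuola", "studenti"]),
--     "lavoro": (8, ["lavoro", "occupazione", "disoccupazione", "employment"]),
--     "popolazione": (10, ["popolazione", "popola", "demografic", "residente"]),
--     "salute": (5, ["salute", "health", "sanità", "ospedale", "medicina"]),
--     "territorio": (7, ["territorio", "territorial", "regional", "comune", "provincia"]),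
-- }
--
--
-- def _categorize_dataset(dataset_id: str, dataset_name: str) -> tuple[str, int]:
--     name_lower = dataset_name.lower()
--     matched = [
--         (priority, category)
--         for category, (priority, keywords) in _CATEGORIES.items()
--         if any(kw in name_lower for kw in keywords)
--     ]
--     if matched:
--         priority, category = max(matched)
--         return category, priority
--     return "altro", 1
-- ===== Notes on version B (the rewrite author's own statement) =====
-- stated objective: alternative
-- what changed: Instead of A's ordered first-match if/elif chain, B collects ALL matching categories from an alphabetically-keyed keyword map and returns the max-priority match (correct because priorities are distinct and A's chain is in descending priority order).
import Mathlib
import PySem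

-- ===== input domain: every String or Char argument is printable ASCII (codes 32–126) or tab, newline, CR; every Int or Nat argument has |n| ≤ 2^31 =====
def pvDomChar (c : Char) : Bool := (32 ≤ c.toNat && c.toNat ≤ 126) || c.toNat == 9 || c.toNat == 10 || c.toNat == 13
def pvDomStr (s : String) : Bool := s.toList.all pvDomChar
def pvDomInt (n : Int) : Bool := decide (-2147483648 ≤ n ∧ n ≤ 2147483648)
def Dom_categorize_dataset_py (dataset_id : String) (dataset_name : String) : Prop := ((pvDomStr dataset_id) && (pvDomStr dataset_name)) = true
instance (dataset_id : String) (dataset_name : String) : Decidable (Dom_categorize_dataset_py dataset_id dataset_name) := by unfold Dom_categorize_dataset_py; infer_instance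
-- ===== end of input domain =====

-- B replaces A's ordered first-match if/elif chain by collecting ALL matching categories from an
-- alphabetically ordered keyword map and returning the max-priority match (priorities are distinct).

-- ===== PORT A =====
def categorize_dataset_py (dataset_id : String) (dataset_name : String) : String × Int :=
  let name_lower := PySem.Str.lower dataset_name
  if ["popolazione", "popola", "demografic", "residente"].any
      (fun keyword => PySem.Str.isIn keyword name_lower) then
    ("popolazione", 10)
  else if ["pil", "economia", "economico", "reddito", "prodotto"].any
      (fun keyword => PySem.Str.isIn keyword name_lower) then
    ("economia", 9)
  else if ["lavoro", "occupazione", "disoccupazione", "employment"].any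
      (fun keyword => PySem.Str.isIn keyword name_lower) then
    ("lavoro", 8)
  else if ["territorio", "territorial", "regional", "comune", "provincia"].any
      (fun keyword => PySem.Str.isIn keyword name_lower) then
    ("territorio", 7)
  else if ["istruzione", "education", "università", "scuola", "studenti"].any
      (fun keyword => PySem.Str.isIn keyword name_lower) then
    ("istruzione", 6)
  else if ["salute", "health", "sanità", "ospedale", "medicina"].any
      (fun keyword => PySem.Str.isIn keyword name_lower) then
    ("salute", 5)
  else
    ("altro", 1)

-- ===== PORT B =====
-- Source B's _CATEGORIES dict (alphabetical key order) as an association list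
def pvCategories : List (String × Int × List String) :=
  [ ("economia", 9, ["pil", "economia", "economico", "reddito", "prodotto"]),
    ("istruzione", 6, ["istruzione", "education", "università", "scuola", "studenti"]),
    ("lavoro", 8, ["lavoro", "occupazione", "disoccupazione", "employment"]),
    ("popolazione", 10, ["popolazione", "popola", "demografic", "residente"]),
    ("salute", 5, ["salute", "health", "sanità", "ospedale", "medicina"]),
    ("territorio", 7, ["territorio", "territorial", "regional", "comune", "provincia"]) ]

-- Python's `>` on (int, str) tuples, lexicographic (used by max(matched))
def pvPairGt (a b : Int × String) : Bool := a.1 > b.1 || (a.1 == b.1 && a.2 > b.2)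

-- Python max(xs): running max keeping the FIRST maximal element
def pvPyMaxPair (m : Int × String) (rest : List (Int × String)) : Int × String :=
  rest.foldl (fun best x => if pvPairGt x best then x else best) m

def categorize_dataset_py_alt (dataset_id : String) (dataset_name : String) : String × Int :=
  let name_lower := PySem.Str.lower dataset_name
  let matched := (pvCategories.filter
      (fun e => e.2.2.any (fun kw => PySem.Str.isIn kw name_lower))).map
      (fun e => (e.2.1, e.1))
  match matched with
  | [] => ("altro", 1)
  | m :: rest =>
      let best := pvPyMaxPair m rest
      (best.2, best.1)

-- ===== PRECONDITION & SPEC =====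
def Spec_categorize_dataset_py (dataset_id : String) (dataset_name : String) (out : String × Int) : Prop := out = categorize_dataset_py_alt dataset_id dataset_name
instance (dataset_id : String) (dataset_name : String) (out : String × Int) : Decidable (Spec_categorize_dataset_py dataset_id dataset_name out) := by unfold Spec_categorize_dataset_py; infer_instance

-- ===== CLAIM (what is proved, stated in full; the proofs are below) =====
def Claim_equal_categorize_dataset_py : Prop := ∀ (dataset_id : String) (dataset_name : String), Dom_categorize_dataset_py dataset_id dataset_name → Spec_categorize_dataset_py dataset_id dataset_name (categorize_dataset_py dataset_id dataset_name)

-- ===== LEMMAS AND PROOFS =====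

-- ===== VERDICT (by name: the statement is the Claim_ definition above) =====
theorem categorize_dataset_py_spec : Claim_equal_categorize_dataset_py := by
  intro dataset_id dataset_name _
  show categorize_dataset_py dataset_id dataset_name = categorize_dataset_py_alt dataset_id dataset_name
  simp only [categorize_dataset_py, categorize_dataset_py_alt, pvCategories]
  set f := fun kw => PySem.Str.isIn kw (PySem.Str.lower dataset_name) with hf
  cases hP : (["popolazione", "popola", "demografic", "residente"].any f) <;>
  cases hE : (["pil", "economia", "economico", "reddito", "prodotto"].any f) <;>
  cases hL : (["lavoro", "occupazione", "disoccupazione", "employment"].any f) <;>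
  cases hT : (["territorio", "territorial", "regional", "comune", "provincia"].any f) <;>
  cases hI : (["istruzione", "education", "università", "scuola", "studenti"].any f) <;>
  cases hS : (["salute", "health", "sanità", "ospedale", "medicina"].any f) <;>
  · simp only [List.any_cons, List.any_nil, Bool.or_false] at hP hE hL hT hI hS
    simp [List.filter, List.any_cons, List.any_nil, pvPyMaxPair, pvPairGt,
          hP, hE, hL, hT, hI, hS]
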